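-- pv_equiv track=rewrite | github.com/zhaohuaxishi/auto-header | ftplugin/cpp/auto_header.py | skip_head_comment
-- ===== SOURCE A (Python) =====
-- def skip_head_comment(buf):
--     beg, end = 0, 0
--     comments = ("//", "/*")
--     while buf[end][:2] in comments:
--         if buf[end][:2] == "//":
--             # skil whole block of c++ comment
--             while buf[end].startswith("//"):
--                 end += 1
--         else:
--             # skil whole c comment
--             while "*/" not in buf[end]:
--                 end += 1
--
--             # insert at next line
--             end += 1
--
--     return end
-- ===== SOURCE B (Python) =====
-- def skip_head_comment(buf):
--     end = 0
--     in_c_comment = False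
--     while True:
--         line = buf[end]
--         if in_c_comment:
--             end += 1
--             if "*/" in line:
--                 in_c_comment = False
--         elif line.startswith("//"):
--             end += 1
--         elif line.startswith("/*"):
--             end += 1
--             if "*/" not in line:
--                 in_c_comment = True
--         else:
--             break
--     return end
-- ===== Notes on version B (the rewrite author's own statement) =====
-- stated objective: alternative
-- what changed: Replaces A's outer while with two nested skip-loops by a single-pass loop over one index that processes one line per iteration, carrying a boolean in_c_comment state instead of re-dispatching on buf[end][:2].
import Mathlib
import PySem

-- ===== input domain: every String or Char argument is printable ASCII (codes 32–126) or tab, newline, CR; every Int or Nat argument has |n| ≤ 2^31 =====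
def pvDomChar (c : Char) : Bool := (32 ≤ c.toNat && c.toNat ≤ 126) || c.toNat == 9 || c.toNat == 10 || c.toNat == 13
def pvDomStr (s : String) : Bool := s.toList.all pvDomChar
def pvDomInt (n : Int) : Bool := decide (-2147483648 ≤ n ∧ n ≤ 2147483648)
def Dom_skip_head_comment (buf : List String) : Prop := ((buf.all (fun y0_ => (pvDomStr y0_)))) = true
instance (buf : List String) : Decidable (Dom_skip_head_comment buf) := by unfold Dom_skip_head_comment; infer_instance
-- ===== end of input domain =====

-- B rewrites A's nested comment-skipping loops as one single-pass loop over an index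
-- with a boolean in-comment state (objective: alternative decomposition, same cost).

-- ===== PORT A =====
-- none = the IndexError path (buf[end] read out of range, as A's Python does on
-- inputs outside Pre_); the top-level wrapper returns 0 there, outside Pre_.

-- l[:2] == p for the two 2-character comment markers (used by the ports' termination)
theorem pvSlice2_iff (l p : String) (hp : p.toList.length = 2) :
    (PySem.Str.slice l none (some 2) = p) ↔ PySem.Str.startswith l p = true := by
  have htake : (PySem.Str.slice l none (some 2)).toList = l.toList.take 2 := by
    simp [PySem.Str.toList_slice]
    rw [PySem.List.slice_to _ (by norm_num)]
    rfl
  rw [PySem.Str.startswith_eq, PySem.Chars.startswith_iff, List.prefix_iff_eq_take, hp]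
  constructor
  · intro h; rw [← h, htake]
  · intro h; apply String.ext
    rw [htake]; exact h.symm

-- inner loop `while buf[end].startswith("//"): end += 1`
def pvSkipSlashes (buf : List String) (e : Nat) : Option Nat :=
  match h : buf[e]? with
  | none => none
  | some l => if PySem.Str.startswith l "//" then pvSkipSlashes buf (e+1) else some e
termination_by buf.length - e
decreasing_by
  have : e < buf.length := (List.getElem?_eq_some_iff.mp h).1
  omega

-- inner loop `while "*/" not in buf[end]: end += 1`
def pvSkipCBody (buf : List String) (e : Nat) : Option Nat :=
  match h : buf[e]? with
  | none => none
  | some l => if PySem.Str.isIn "*/" l then some e else pvSkipCBody buf (e+1)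
termination_by buf.length - e
decreasing_by
  have : e < buf.length := (List.getElem?_eq_some_iff.mp h).1
  omega

theorem pvSkipSlashes_ge (buf : List String) : ∀ e e', pvSkipSlashes buf e = some e' → e ≤ e' := by
  intro e
  fun_induction pvSkipSlashes buf e with
  | case1 => intro e' h; exact absurd h (by simp)
  | case2 e l hl hs ih => intro e' h; exact le_trans (by omega) (ih e' h)
  | case3 e l hl hs => intro e' h; simp at h; omega

theorem pvSkipCBody_ge (buf : List String) : ∀ e e', pvSkipCBody buf e = some e' → e ≤ e' := by
  intro e
  fun_induction pvSkipCBody buf e with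
  | case1 => intro e' h; exact absurd h (by simp)
  | case2 e l hl hs => intro e' h; simp at h; omega
  | case3 e l hl hs ih => intro e' h; exact le_trans (by omega) (ih e' h)

theorem pvSkipSlashes_step (buf : List String) (e : Nat) (l : String)
    (h : buf[e]? = some l) (hs : PySem.Str.startswith l "//" = true) :
    pvSkipSlashes buf e = pvSkipSlashes buf (e+1) := by
  rw [pvSkipSlashes]; split <;> simp_all

-- outer loop `while buf[end][:2] in ("//", "/*")`
def pvOuterA (buf : List String) (e : Nat) : Option Nat :=
  match h : buf[e]? with
  | none => none
  | some l =>
    if h1 : PySem.Str.slice l none (some 2) = "//" ∨ PySem.Str.slice l none (some 2) = "/*" then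
      if h2 : PySem.Str.slice l none (some 2) = "//" then
        match h3 : pvSkipSlashes buf e with
        | none => none
        | some e' => pvOuterA buf e'
      else
        match h3 : pvSkipCBody buf e with
        | none => none
        | some e' => pvOuterA buf (e'+1)
    else some e
termination_by buf.length - e
decreasing_by
  · have he : e < buf.length := (List.getElem?_eq_some_iff.mp h).1
    have hs : PySem.Str.startswith l "//" = true := (pvSlice2_iff l "//" rfl).mp h2
    have h4 : pvSkipSlashes buf (e+1) = some e' := by
      rw [← pvSkipSlashes_step buf e l h hs]; exact h3
    have := pvSkipSlashes_ge buf (e+1) e' h4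
    omega
  · have he : e < buf.length := (List.getElem?_eq_some_iff.mp h).1
    have := pvSkipCBody_ge buf e e' h3
    omega

def skip_head_comment (buf : List String) : Int :=
  ((pvOuterA buf 0).getD 0 : Nat)

-- ===== PORT B =====
-- B: one loop, one line per iteration, boolean in_c_comment state
def pvLoopB (buf : List String) (e : Nat) (inC : Bool) : Option Nat :=
  match h : buf[e]? with
  | none => none
  | some l =>
    if inC then pvLoopB buf (e+1) (!PySem.Str.isIn "*/" l)
    else if PySem.Str.startswith l "//" then pvLoopB buf (e+1) false
    else if PySem.Str.startswith l "/*" then pvLoopB buf (e+1) (!PySem.Str.isIn "*/" l)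
    else some e
termination_by buf.length - e
decreasing_by
  all_goals have : e < buf.length := (List.getElem?_eq_some_iff.mp h).1
  all_goals omega

def skip_head_comment_alt (buf : List String) : Int :=
  ((pvLoopB buf 0 false).getD 0 : Nat)

-- ===== PRECONDITION & SPEC =====
-- Pre_: the leading lines decompose into '//' lines and complete '/* … */' blocks
-- followed by an in-range non-comment line; on every other input A's Python raises
-- IndexError running past the end of the buffer (no value is returned there).
mutual
def pvHeadComments : List String → Bool
  | [] => false
  | l :: r =>
    if PySem.Str.startswith l "//" then pvHeadComments r
    else if PySem.Str.startswith l "/*" then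
      (if PySem.Str.isIn "*/" l then pvHeadComments r else pvInCBlock r)
    else true
def pvInCBlock : List String → Bool
  | [] => false
  | l :: r => if PySem.Str.isIn "*/" l then pvHeadComments r else pvInCBlock r
end

def Pre_skip_head_comment (buf : List String) : Prop := pvHeadComments buf = true
instance (buf : List String) : Decidable (Pre_skip_head_comment buf) := by
  unfold Pre_skip_head_comment; infer_instance

def pvWitness_skip_head_comment : List String :=
  ["// header", "/* block", " still block */", "int main() {"]

def Spec_skip_head_comment (buf : List String) (out : Int) : Prop := out = skip_head_comment_alt buf
instance (buf : List String) (out : Int) : Decidable (Spec_skip_head_comment buf out) := by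
  unfold Spec_skip_head_comment; infer_instance

-- ===== CLAIM (what is proved, stated in full; the proofs are below) =====
def Claim_equal_skip_head_comment : Prop := ∀ (buf : List String), Dom_skip_head_comment buf → Pre_skip_head_comment buf → Spec_skip_head_comment buf (skip_head_comment buf)

-- ===== LEMMAS AND PROOFS =====

-- branch equations of pvLoopB
theorem pvLoopB_nil (buf : List String) (e : Nat) (inC : Bool) (h : buf[e]? = none) :
    pvLoopB buf e inC = none := by
  rw [pvLoopB]; split <;> simp_all

theorem pvLoopB_true (buf : List String) (e : Nat) (l : String) (h : buf[e]? = some l) :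
    pvLoopB buf e true = pvLoopB buf (e+1) (!PySem.Str.isIn "*/" l) := by
  rw [pvLoopB]; split <;> simp_all

theorem pvLoopB_sl (buf : List String) (e : Nat) (l : String) (h : buf[e]? = some l)
    (hs : PySem.Str.startswith l "//" = true) :
    pvLoopB buf e false = pvLoopB buf (e+1) false := by
  rw [pvLoopB]; split <;> simp_all

theorem pvLoopB_st (buf : List String) (e : Nat) (l : String) (h : buf[e]? = some l)
    (hns : PySem.Str.startswith l "//" = false) (hs : PySem.Str.startswith l "/*" = true) :
    pvLoopB buf e false = pvLoopB buf (e+1) (!PySem.Str.isIn "*/" l) := by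
  rw [pvLoopB]; split <;> simp_all

theorem pvLoopB_stop (buf : List String) (e : Nat) (l : String) (h : buf[e]? = some l)
    (hns : PySem.Str.startswith l "//" = false) (hns2 : PySem.Str.startswith l "/*" = false) :
    pvLoopB buf e false = some e := by
  rw [pvLoopB]; split <;> simp_all


-- branch equations of pvOuterA
theorem pvOuterA_nil (buf : List String) (e : Nat) (h : buf[e]? = none) :
    pvOuterA buf e = none := by
  rw [pvOuterA]; split <;> simp_all

theorem pvOuterA_sl (buf : List String) (e : Nat) (l : String) (h : buf[e]? = some l)
    (h2 : PySem.Str.slice l none (some 2) = "//") :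
    pvOuterA buf e = (pvSkipSlashes buf e).bind (fun e' => pvOuterA buf e') := by
  rw [pvOuterA]
  split
  · simp_all
  · rename_i l' hl'
    rw [h] at hl'; injection hl' with hl'; subst hl'
    rw [dif_pos (Or.inl h2), dif_pos h2]
    cases pvSkipSlashes buf e <;> simp

theorem pvOuterA_st (buf : List String) (e : Nat) (l : String) (h : buf[e]? = some l)
    (h2 : ¬ PySem.Str.slice l none (some 2) = "//")
    (h3 : PySem.Str.slice l none (some 2) = "/*") :
    pvOuterA buf e = (pvSkipCBody buf e).bind (fun e' => pvOuterA buf (e'+1)) := by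
  rw [pvOuterA]
  split
  · simp_all
  · rename_i l' hl'
    rw [h] at hl'; injection hl' with hl'; subst hl'
    rw [dif_pos (Or.inr h3), dif_neg h2]
    cases pvSkipCBody buf e <;> simp

theorem pvOuterA_stop (buf : List String) (e : Nat) (l : String) (h : buf[e]? = some l)
    (h2 : ¬ PySem.Str.slice l none (some 2) = "//")
    (h3 : ¬ PySem.Str.slice l none (some 2) = "/*") :
    pvOuterA buf e = some e := by
  rw [pvOuterA]
  split
  · simp_all
  · rename_i l' hl'
    rw [h] at hl'; injection hl' with hl'; subst hl'
    rw [dif_neg (by tauto)]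

-- A's inner '//' loop, ran from e, agrees with B stepping line by line
theorem pvAux1 (buf : List String) : ∀ e,
    (pvSkipSlashes buf e).bind (fun e' => pvLoopB buf e' false) = pvLoopB buf e false := by
  intro e
  fun_induction pvSkipSlashes buf e with
  | case1 e h => simp [pvLoopB_nil buf e false h]
  | case2 e l h hs ih => rw [pvLoopB_sl buf e l h hs] at *; simpa using ih
  | case3 e l h hs => simp

-- A's inner '*/' scan (plus the final end += 1) agrees with B's in-comment state
theorem pvAux2 (buf : List String) : ∀ e,
    (pvSkipCBody buf e).bind (fun e' => pvLoopB buf (e'+1) false) = pvLoopB buf e true := by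
  intro e
  fun_induction pvSkipCBody buf e with
  | case1 e h => simp [pvLoopB_nil buf e true h]
  | case2 e l h hs =>
      rw [pvLoopB_true buf e l h]
      simp only [PySem.Str.isIn_eq] at hs
      rw [show ("*/".toList) = ['*','/'] from rfl] at hs
      simp [hs]
  | case3 e l h hs ih =>
      rw [pvLoopB_true buf e l h]
      simp only [PySem.Str.isIn_eq] at hs
      rw [show ("*/".toList) = ['*','/'] from rfl] at hs
      simp [hs]
      simpa using ih

theorem pvMain (buf : List String) : ∀ n e, buf.length - e < n →
    pvOuterA buf e = pvLoopB buf e false := by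
  intro n
  induction n with
  | zero => intro e h; omega
  | succ n ih =>
    intro e hlt
    cases h : buf[e]? with
    | none => rw [pvOuterA_nil buf e h, pvLoopB_nil buf e false h]
    | some l =>
      have he : e < buf.length := (List.getElem?_eq_some_iff.mp h).1
      by_cases h2 : PySem.Str.slice l none (some 2) = "//"
      · have hs : PySem.Str.startswith l "//" = true := (pvSlice2_iff l "//" rfl).mp h2
        rw [pvOuterA_sl buf e l h h2, ← pvAux1 buf e]
        cases hss : pvSkipSlashes buf e with
        | none => simp
        | some e' =>
          have h4 : pvSkipSlashes buf (e+1) = some e' := by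
            rw [← pvSkipSlashes_step buf e l h hs]; exact hss
          have hge := pvSkipSlashes_ge buf (e+1) e' h4
          simp only [Option.bind_some]
          exact ih e' (by omega)
      · by_cases h3 : PySem.Str.slice l none (some 2) = "/*"
        · have hs2 : PySem.Str.startswith l "/*" = true := (pvSlice2_iff l "/*" rfl).mp h3
          have hns : PySem.Str.startswith l "//" = false := by
            cases hb : PySem.Str.startswith l "//"
            · rfl
            · exact absurd ((pvSlice2_iff l "//" rfl).mpr hb) h2
          have hchain : pvLoopB buf e false = pvLoopB buf e true := by
            rw [pvLoopB_st buf e l h hns hs2, pvLoopB_true buf e l h]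
          rw [pvOuterA_st buf e l h h2 h3, hchain, ← pvAux2 buf e]
          cases hcc : pvSkipCBody buf e with
          | none => simp
          | some e' =>
            have hge := pvSkipCBody_ge buf e e' hcc
            simp only [Option.bind_some]
            exact ih (e'+1) (by omega)
        · have hns : PySem.Str.startswith l "//" = false := by
            cases hb : PySem.Str.startswith l "//"
            · rfl
            · exact absurd ((pvSlice2_iff l "//" rfl).mpr hb) h2
          have hns2 : PySem.Str.startswith l "/*" = false := by
            cases hb : PySem.Str.startswith l "/*"
            · rfl
            · exact absurd ((pvSlice2_iff l "/*" rfl).mpr hb) h3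
          rw [pvOuterA_stop buf e l h h2 h3, pvLoopB_stop buf e l h hns hns2]

-- ===== VERDICT (by name: the statement is the Claim_ definition above) =====
theorem skip_head_comment_spec : Claim_equal_skip_head_comment := by
  intro buf _ _
  unfold Spec_skip_head_comment skip_head_comment skip_head_comment_alt
  rw [pvMain buf (buf.length + 1) 0 (by omega)]
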